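-- pv_equiv track=rewrite | github.com/costa-group/gasol_ml | filter_benchamrks.py | abstract_constants
-- ===== SOURCE A (Python) =====
-- def abstract_constants(bytecode_sequence_orig):
--     bytecode_sequence = []
--     consts = list(dict.fromkeys((filter(lambda x: x.startswith('#'), bytecode_sequence_orig)))) # all constants in a list, without repetitions
--     for t in bytecode_sequence_orig:
--         if t.startswith("#"):
--             t = f'{consts.index(t)}' # repetitions are kept, but with smaller number of digits, we also add ! at the end
--             for c in t:
--                 bytecode_sequence.append(c.upper()) # upper used when we had hex, i keep it for now
--         else:
--             bytecode_sequence.append(t)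
--
--     return bytecode_sequence
-- ===== SOURCE B (Python) =====
-- def abstract_constants(bytecode_sequence_orig):
--     # rewrite-based algorithm: emit tokens up to the next (fresh) constant, expand it
--     # to the digits of a running counter, then splice that expansion over all its
--     # later occurrences in the remaining tokens -- so no dedup list, no index
--     # structure and no per-token index lookup ever exists.
--     out = []
--     rest = list(bytecode_sequence_orig)
--     next_idx = 0
--     while True:
--         j = 0
--         while j < len(rest) and not rest[j].startswith('#'):
--             out.append(rest[j])
--             j += 1
--         if j == len(rest):
--             return out
--         t = rest[j]
--         rep = [c.upper() for c in str(next_idx)]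
--         next_idx += 1
--         out += rep
--         rest = [u for x in rest[j + 1:] for u in (rep if x == t else [x])]
-- ===== Notes on version B (the rewrite author's own statement) =====
-- stated objective: alternative
-- what changed: B uses a rewrite/substitution algorithm: it scans to the next constant, expands it to the digits of a running counter, and splices that expansion over all later occurrences of the same constant in the remaining tokens, so the dedup list, the index lookup and any per-token index structure of A disappear entirely
import Mathlib
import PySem

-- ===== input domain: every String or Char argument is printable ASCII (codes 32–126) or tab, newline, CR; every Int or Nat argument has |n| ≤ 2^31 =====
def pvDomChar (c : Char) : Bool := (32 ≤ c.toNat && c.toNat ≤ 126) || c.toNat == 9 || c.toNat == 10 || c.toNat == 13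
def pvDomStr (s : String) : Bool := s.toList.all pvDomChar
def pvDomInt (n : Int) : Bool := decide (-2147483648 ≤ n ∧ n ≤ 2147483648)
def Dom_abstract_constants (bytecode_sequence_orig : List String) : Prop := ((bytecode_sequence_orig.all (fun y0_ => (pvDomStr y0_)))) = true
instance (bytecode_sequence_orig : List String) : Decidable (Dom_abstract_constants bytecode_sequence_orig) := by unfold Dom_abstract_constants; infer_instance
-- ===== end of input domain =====

-- B replaces A's dedup-list + per-token consts.index scan by a rewrite algorithm:
-- each fresh constant is expanded to the digits of a running counter and that
-- expansion is spliced over its later occurrences (alternative decomposition).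

-- ===== PORT A =====
-- loop body of A's for-loop, over the fixed dedup list `consts`
def pvBodyA (consts : List String) (bytecode_sequence : List String) (t : String) : List String :=
  if PySem.Str.startswith t "#" then
    -- consts.index(t): t is always a member of consts when this branch runs, so getD 0 is never used
    let t' := PySem.Int.toStr (((PySem.List.index? consts t).getD 0 : Nat) : Int)
    t'.toList.foldl (fun acc c => acc ++ [PySem.Str.upper (String.ofList [c])]) bytecode_sequence
  else bytecode_sequence ++ [t]

def abstract_constants (bytecode_sequence_orig : List String) : List String :=
  let consts := PySem.List.dedup (bytecode_sequence_orig.filter (fun x => PySem.Str.startswith x "#"))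
  bytecode_sequence_orig.foldl (pvBodyA consts) []

-- ===== PORT B =====
-- rep = [c.upper() for c in str(next_idx)]
def pvRep (next_idx : Int) : List String :=
  (PySem.Int.toStr next_idx).toList.map (fun c => PySem.Str.upper (String.ofList [c]))

-- [u for x in xs for u in (rep if x == t else [x])]
def pvSubst (t : String) (rep : List String) (xs : List String) : List String :=
  xs.flatMap (fun x => if x = t then rep else [x])

-- every character of str(n) is a digit or '-', so no replacement token starts with '#'
theorem pvUpperDigitChar_ne (d : Nat) : PySem.Chars.upperChar (Nat.digitChar d) ≠ '#' := by
  by_cases h : d < 16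
  · interval_cases d <;> decide
  · unfold Nat.digitChar
    rw [if_neg (by omega), if_neg (by omega), if_neg (by omega), if_neg (by omega),
        if_neg (by omega), if_neg (by omega), if_neg (by omega), if_neg (by omega),
        if_neg (by omega), if_neg (by omega), if_neg (by omega), if_neg (by omega),
        if_neg (by omega), if_neg (by omega), if_neg (by omega), if_neg (by omega)]
    decide
theorem pvToDigitsCore_upper_ne (b : Nat) : ∀ (f n : Nat) (ds : List Char),
    (∀ c ∈ ds, PySem.Chars.upperChar c ≠ '#') →
    ∀ c ∈ Nat.toDigitsCore b f n ds, PySem.Chars.upperChar c ≠ '#' := by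
  intro f
  induction f with
  | zero => intro n ds h; simpa [Nat.toDigitsCore] using h
  | succ f ih =>
    intro n ds h c hc
    rw [Nat.toDigitsCore] at hc
    by_cases h0 : n / b = 0
    · simp [h0] at hc
      rcases hc with rfl | hc
      · exact pvUpperDigitChar_ne _
      · exact h _ hc
    · simp [h0] at hc
      refine ih _ _ ?_ _ hc
      intro x hx
      rcases List.mem_cons.mp hx with rfl | hx
      · exact pvUpperDigitChar_ne _
      · exact h _ hx
theorem pvToChars_upper_ne (n : Int) : ∀ c ∈ PySem.Int.toChars n, PySem.Chars.upperChar c ≠ '#' := by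
  intro c hc
  unfold PySem.Int.toChars at hc
  split at hc
  · rcases List.mem_cons.mp hc with rfl | hc
    · decide
    · exact pvToDigitsCore_upper_ne 10 _ _ [] (by simp) _ hc
  · exact pvToDigitsCore_upper_ne 10 _ _ [] (by simp) _ hc

theorem pvRep_not_const (n : Int) : ∀ r ∈ pvRep n, PySem.Str.startswith r "#" = false := by
  intro r hr
  rcases List.mem_map.mp hr with ⟨c, hc, rfl⟩
  have hcne : PySem.Chars.upperChar c ≠ '#' := by
    refine pvToChars_upper_ne n c ?_
    rwa [PySem.Int.toList_toStr] at hc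
  have : PySem.Str.upper (String.ofList [c]) = String.ofList [PySem.Chars.upperChar c] := by
    apply String.ext
    simp [PySem.Str.toList_upper, PySem.Chars.upper]
  rw [this]
  simp [PySem.Str.startswith, PySem.Chars.startswith, List.isPrefixOf]
  exact fun h => absurd h.symm hcne

theorem pvRep_countP (n : Int) :
    (pvRep n).countP (fun x => PySem.Str.startswith x "#") = 0 :=
  List.countP_eq_zero.mpr (by
    intro a ha
    simp only [pvRep_not_const n a ha, Bool.false_eq_true, not_false_eq_true])

theorem pvSubst_countP_le (t : String) (n : Int) (xs : List String) :
    (pvSubst t (pvRep n) xs).countP (fun x => PySem.Str.startswith x "#")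
      ≤ xs.countP (fun x => PySem.Str.startswith x "#") := by
  induction xs with
  | nil => simp [pvSubst]
  | cons x xs ih =>
    by_cases hx : x = t
    · have e : pvSubst t (pvRep n) (x :: xs) = pvRep n ++ pvSubst t (pvRep n) xs := by
        simp [pvSubst, hx]
      rw [e, List.countP_append, pvRep_countP, List.countP_cons]
      omega
    · have e : pvSubst t (pvRep n) (x :: xs) = x :: pvSubst t (pvRep n) xs := by
        simp [pvSubst, hx]
      rw [e, List.countP_cons, List.countP_cons]
      omega

-- the outer while-loop of B; `rest.dropWhile` finds the next constant (the inner while-loop)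
def pvGoB (out rest : List String) (next_idx : Int) : List String :=
  match h : rest.dropWhile (fun t => !PySem.Str.startswith t "#") with
  | [] => out ++ rest.takeWhile (fun t => !PySem.Str.startswith t "#")
  | t :: rest' =>
      let rep := pvRep next_idx
      pvGoB (out ++ rest.takeWhile (fun t => !PySem.Str.startswith t "#") ++ rep)
        (pvSubst t rep rest') (next_idx + 1)
termination_by rest.countP (fun x => PySem.Str.startswith x "#")
decreasing_by
  have hsplit : rest.takeWhile (fun t => !PySem.Str.startswith t "#") ++ (t :: rest') = rest := by
    rw [← h]; exact List.takeWhile_append_dropWhile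
  have htk : (rest.takeWhile (fun t => !PySem.Str.startswith t "#")).countP
      (fun x => PySem.Str.startswith x "#") = 0 := by
    refine List.countP_eq_zero.mpr ?_
    intro a ha
    have := List.mem_takeWhile_imp ha
    simp at this
    simp [this]
  have hle := pvSubst_countP_le t next_idx rest'
  calc (pvSubst t (pvRep next_idx) rest').countP (fun x => PySem.Str.startswith x "#")
      ≤ rest'.countP (fun x => PySem.Str.startswith x "#") := hle
    _ < rest.countP (fun x => PySem.Str.startswith x "#") := by
        rw [← hsplit, List.countP_append, htk]
        have ht : PySem.Str.startswith t "#" = true := by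
          have hne : rest.dropWhile (fun t => !PySem.Str.startswith t "#") ≠ [] := by
            rw [h]; simp
          have hh := List.head_dropWhile_not (fun t => !PySem.Str.startswith t "#") hne
          have h2 : (rest.dropWhile (fun t => !PySem.Str.startswith t "#")).head hne = t := by
            have aux : ∀ (l : List String) (hl : l ≠ []), l = t :: rest' → l.head hl = t := by
              intro l hl he; subst he; rfl
            exact aux _ _ h
          rw [h2] at hh
          simpa using hh
        rw [List.countP_cons]
        simp only [ht, if_pos]
        omega

def abstract_constants_alt (bytecode_sequence_orig : List String) : List String :=
  pvGoB [] bytecode_sequence_orig 0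

-- ===== PRECONDITION & SPEC =====
def Spec_abstract_constants (bytecode_sequence_orig : List String) (out : List String) : Prop := out = abstract_constants_alt bytecode_sequence_orig
instance (bytecode_sequence_orig : List String) (out : List String) : Decidable (Spec_abstract_constants bytecode_sequence_orig out) := by unfold Spec_abstract_constants; infer_instance

-- ===== CLAIM (what is proved, stated in full; the proofs are below) =====
def Claim_equal_abstract_constants : Prop := ∀ (bytecode_sequence_orig : List String), Dom_abstract_constants bytecode_sequence_orig → Spec_abstract_constants bytecode_sequence_orig (abstract_constants bytecode_sequence_orig)

-- ===== LEMMAS AND PROOFS =====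

-- the ordered list of distinct constants of l
def pvCs (l : List String) : List String :=
  PySem.List.dedup (l.filter (fun x => PySem.Str.startswith x "#"))

-- common normal form: per-token expansion with consts of l and digit offset n
def pvF (l : List String) (n : Int) : List String :=
  l.flatMap (fun t => if PySem.Str.startswith t "#" then
    pvRep (n + (((PySem.List.index? (pvCs l) t).getD 0 : Nat) : Int)) else [t])

theorem pvRep_not_const' (n : Int) :
    ∀ r ∈ pvRep n, PySem.Chars.startswith r.toList ['#'] = false := by
  intro r hr
  simpa using pvRep_not_const n r hr

-- building the dedup set commutes with filtering
theorem pvOfList_filter (q : String → Bool) (l : List String) :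
    PySem.Set.ofList (l.filter q) = (PySem.Set.ofList l).filter q := by
  induction l using List.reverseRecOn with
  | nil => simp [PySem.Set.ofList, PySem.Set.empty]
  | append_singleton l x ih =>
    have hof : ∀ (m : List String), PySem.Set.ofList (m ++ [x]) = PySem.Set.add (PySem.Set.ofList m) x := by
      intro m; simp [PySem.Set.ofList, List.foldl_append]
    by_cases hq : q x
    · rw [List.filter_append, show List.filter q [x] = [x] by simp [hq], hof, hof]
      by_cases hm : x ∈ PySem.Set.ofList l
      · have hm' : x ∈ l := (PySem.Set.mem_ofList l x).mp hm
        have hmf : x ∈ PySem.Set.ofList (l.filter q) :=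
          (PySem.Set.mem_ofList _ x).mpr (List.mem_filter.mpr ⟨hm', hq⟩)
        rw [PySem.Set.add_of_mem hm, PySem.Set.add_of_mem hmf, ih]
      · have hmf : x ∉ PySem.Set.ofList (l.filter q) := by
          intro hc
          exact hm ((PySem.Set.mem_ofList l x).mpr
            (List.mem_filter.mp ((PySem.Set.mem_ofList _ x).mp hc)).1)
        rw [PySem.Set.add_of_not_mem hm, PySem.Set.add_of_not_mem hmf, ih,
          List.filter_append, show List.filter q [x] = [x] by simp [hq]]
    · rw [List.filter_append, show List.filter q [x] = [] by simp [hq], List.append_nil, hof]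
      by_cases hm : x ∈ PySem.Set.ofList l
      · rw [PySem.Set.add_of_mem hm, ih]
      · rw [PySem.Set.add_of_not_mem hm, ih, List.filter_append,
          show List.filter q [x] = [] by simp [hq], List.append_nil]

-- substituting rep for t keeps exactly the other constants, in order
theorem pvSubst_filter (t : String) (n : Int) (xs : List String) :
    (pvSubst t (pvRep n) xs).filter (fun x => PySem.Str.startswith x "#")
      = ((xs.filter (fun x => PySem.Str.startswith x "#")).filter (fun y => !(y == t))) := by
  induction xs with
  | nil => simp [pvSubst]
  | cons x xs ih =>
    have hrep : (pvRep n).filter (fun x => PySem.Str.startswith x "#") = [] :=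
      List.filter_eq_nil_iff.mpr (by intro a ha; simp [pvRep_not_const' n a ha])
    by_cases hx : x = t
    · subst hx
      have e : pvSubst x (pvRep n) (x :: xs) = pvRep n ++ pvSubst x (pvRep n) xs := by
        simp [pvSubst]
      rw [e, List.filter_append, hrep, List.nil_append, ih, List.filter_cons]
      by_cases hpx : PySem.Str.startswith x "#" = true
      · rw [if_pos hpx, List.filter_cons, if_neg (by simp)]
      · rw [if_neg hpx]
    · have e : pvSubst t (pvRep n) (x :: xs) = x :: pvSubst t (pvRep n) xs := by
        simp [pvSubst, hx]
      rw [e, List.filter_cons, List.filter_cons]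
      by_cases hpx : PySem.Str.startswith x "#" = true
      · rw [if_pos hpx, if_pos hpx, List.filter_cons, if_pos (by simp [hx]), ih]
      · rw [if_neg hpx, if_neg hpx, ih]

theorem pvSW_false {x : String} (h : PySem.Str.startswith x "#" = false) :
    PySem.Chars.startswith x.toList ['#'] = false := by simpa using h

theorem pvFlatMap_congr {a b : Type} (l : List a) (f g : a → List b)
    (h : ∀ x ∈ l, f x = g x) : l.flatMap f = l.flatMap g := by
  induction l with
  | nil => simp
  | cons x xs ih =>
    rw [List.flatMap_cons, List.flatMap_cons, h x (by simp), ih (fun x hx => h x (by simp [hx]))]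

theorem pvFlatMap_flatMap {a b c : Type} (l : List a) (f : a → List b) (g : b → List c) :
    (l.flatMap f).flatMap g = l.flatMap (fun x => (f x).flatMap g) := by
  induction l with
  | nil => simp
  | cons x xs ih => simp [List.flatMap_cons, ih]

theorem pvFlatMap_id_of (l : List String) (f : String → List String)
    (h : ∀ x ∈ l, f x = [x]) : l.flatMap f = l := by
  rw [pvFlatMap_congr l f (fun x => [x]) h, List.flatMap_singleton']

-- decomposition of the dedup list at the first constant
theorem pvCs_decomp (pre rest' : List String) (t : String)
    (hpre : ∀ x ∈ pre, PySem.Str.startswith x "#" = false)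
    (ht : PySem.Str.startswith t "#" = true) :
    pvCs (pre ++ t :: rest')
      = t :: (PySem.Set.ofList (rest'.filter (fun x => PySem.Str.startswith x "#"))).filter
          (fun y => !(y == t)) := by
  unfold pvCs PySem.List.dedup
  rw [List.filter_append,
    List.filter_eq_nil_iff.mpr (by intro a ha; simp [pvSW_false (hpre a ha)]),
    List.nil_append, List.filter_cons, if_pos ht]
  have h1 : PySem.Set.ofList (t :: rest'.filter (fun x => PySem.Str.startswith x "#"))
      = PySem.Set.update [t] (rest'.filter (fun x => PySem.Str.startswith x "#")) := by
    simp [PySem.Set.ofList, PySem.Set.update, PySem.Set.add, PySem.Set.empty, PySem.Set.contains]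
  rw [h1, PySem.Set.update_eq_append_filter]
  have h2 : (fun y => !PySem.Set.contains [t] y) = (fun y : String => !(y == t)) := by
    funext y
    simp only [PySem.Set.contains, List.contains_cons, List.contains_nil, Bool.or_false]
  rw [h2]
  rfl

theorem pvCs_subst (t : String) (n : Int) (rest' : List String) :
    pvCs (pvSubst t (pvRep n) rest')
      = (PySem.Set.ofList (rest'.filter (fun x => PySem.Str.startswith x "#"))).filter
          (fun y => !(y == t)) := by
  unfold pvCs PySem.List.dedup
  rw [pvSubst_filter, pvOfList_filter]

-- terminal case: no constants left
theorem pvF_all_not (l : List String) (n : Int)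
    (h : ∀ x ∈ l, PySem.Str.startswith x "#" = false) : pvF l n = l := by
  unfold pvF
  refine pvFlatMap_id_of l _ ?_
  intro x hx
  simp [pvSW_false (h x hx)]

-- the heart: one step of B's rewriting, seen through pvF
theorem pvF_step (pre rest' : List String) (t : String) (n : Int)
    (hpre : ∀ x ∈ pre, PySem.Str.startswith x "#" = false)
    (ht : PySem.Str.startswith t "#" = true) :
    pvF (pre ++ t :: rest') n = pre ++ pvRep n ++ pvF (pvSubst t (pvRep n) rest') (n + 1) := by
  have hcs := pvCs_decomp pre rest' t hpre ht
  set c2 := (PySem.Set.ofList (rest'.filter (fun x => PySem.Str.startswith x "#"))).filter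
      (fun y => !(y == t)) with hc2
  unfold pvF
  rw [hcs, pvCs_subst, ← hc2, List.flatMap_append, List.flatMap_cons]
  have hpre' : pre.flatMap (fun t' => if PySem.Str.startswith t' "#" then
      pvRep (n + (((PySem.List.index? (t :: c2) t').getD 0 : Nat) : Int)) else [t']) = pre := by
    refine pvFlatMap_id_of _ _ ?_
    intro x hx
    simp [pvSW_false (hpre x hx)]
  rw [hpre']
  have hft : (if PySem.Str.startswith t "#" then
      pvRep (n + (((PySem.List.index? (t :: c2) t).getD 0 : Nat) : Int)) else [t]) = pvRep n := by
    rw [if_pos ht, PySem.List.index?_cons_self]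
    norm_num
  rw [hft, pvSubst, pvFlatMap_flatMap, List.append_assoc]
  congr 1
  congr 1
  apply pvFlatMap_congr
  intro x hx
  by_cases hxt : x = t
  · subst hxt
    rw [if_pos rfl, if_pos ht, PySem.List.index?_cons_self]
    norm_num
    refine (pvFlatMap_id_of _ _ ?_).symm
    intro r hr
    simp [pvSW_false (pvRep_not_const n r hr)]
  · rw [if_neg hxt, List.flatMap_singleton]
    by_cases hpx : PySem.Str.startswith x "#" = true
    · rw [if_pos hpx, if_pos hpx]
      have hmem : x ∈ c2 := by
        rw [hc2]
        refine List.mem_filter.mpr ⟨?_, by simp [hxt]⟩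
        exact (PySem.Set.mem_ofList _ x).mpr (List.mem_filter.mpr ⟨hx, hpx⟩)
      obtain ⟨i, hi⟩ := Option.isSome_iff_exists.mp
        ((PySem.List.index?_isSome_iff c2 x).mpr hmem)
      rw [PySem.List.index?_cons_of_ne _ (fun he => hxt he.symm), hi]
      simp only [Option.map_some, Option.getD_some]
      congr 1
      push_cast
      ring
    · rw [if_neg hpx, if_neg hpx]

-- the invariant of B's outer loop
theorem pvGoB_eq (m : Nat) : ∀ (rest : List String),
    rest.countP (fun x => PySem.Str.startswith x "#") ≤ m →
    ∀ (out : List String) (n : Int), pvGoB out rest n = out ++ pvF rest n := by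
  induction m with
  | zero =>
    intro rest hm out n
    have hall : ∀ x ∈ rest, PySem.Str.startswith x "#" = false := by
      intro x hx
      by_contra hc
      have : 0 < rest.countP (fun x => PySem.Str.startswith x "#") :=
        List.countP_pos_iff.mpr ⟨x, hx, by simpa using hc⟩
      omega
    rw [pvGoB]
    have hd : rest.dropWhile (fun t => !PySem.Str.startswith t "#") = [] :=
      List.dropWhile_eq_nil_iff.mpr (by intro x hx; simp [pvSW_false (hall x hx)])
    rw [pvF_all_not rest n hall]
    split
    · rw [List.takeWhile_eq_self_iff.mpr (by intro x hx; simp [pvSW_false (hall x hx)])]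
    · rename_i t rest' hmatch
      rw [hd] at hmatch
      exact absurd hmatch (by simp)
  | succ m ih =>
    intro rest hm out n
    rw [pvGoB]
    split
    · rename_i hmatch
      have hall : ∀ x ∈ rest, PySem.Str.startswith x "#" = false := by
        intro x hx
        have := List.dropWhile_eq_nil_iff.mp hmatch x hx
        simpa using this
      rw [pvF_all_not rest n hall,
        List.takeWhile_eq_self_iff.mpr (by intro x hx; simp [pvSW_false (hall x hx)])]
    · rename_i t rest' hmatch
      have hsplit : rest.takeWhile (fun t => !PySem.Str.startswith t "#") ++ (t :: rest') = rest := by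
        rw [← hmatch]; exact List.takeWhile_append_dropWhile
      have hpre : ∀ x ∈ rest.takeWhile (fun t => !PySem.Str.startswith t "#"),
          PySem.Str.startswith x "#" = false := by
        intro x hx
        have := List.mem_takeWhile_imp hx
        simpa using this
      have ht : PySem.Str.startswith t "#" = true := by
        have hne : rest.dropWhile (fun t => !PySem.Str.startswith t "#") ≠ [] := by
          rw [hmatch]; simp
        have hh := List.head_dropWhile_not (fun t => !PySem.Str.startswith t "#") hne
        have h2 : (rest.dropWhile (fun t => !PySem.Str.startswith t "#")).head hne = t := by
          have aux : ∀ (l : List String) (hl : l ≠ []), l = t :: rest' → l.head hl = t := by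
            intro l hl he; subst he; rfl
          exact aux _ _ hmatch
        rw [h2] at hh
        simpa using hh
      have hcount : (pvSubst t (pvRep n) rest').countP (fun x => PySem.Str.startswith x "#") ≤ m := by
        have h1 := pvSubst_countP_le t n rest'
        have h2 := congrArg (List.countP (fun x => PySem.Str.startswith x "#")) hsplit
        rw [List.countP_append, List.countP_cons, if_pos ht] at h2
        omega
      rw [ih _ hcount]
      conv_rhs => rw [← hsplit]
      rw [pvF_step _ _ _ _ hpre ht]
      simp

-- A's fold, rewritten as the same per-token expansion
theorem pvDig (k : Int) (acc : List String) :
    (PySem.Int.toStr k).toList.foldl (fun acc c => acc ++ [PySem.Str.upper (String.ofList [c])]) acc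
      = acc ++ pvRep k := by
  rw [PySem.List.foldl_append_eq_flatMap]
  congr 1
  unfold pvRep
  induction (PySem.Int.toStr k).toList with
  | nil => simp
  | cons c cs ih => simp [List.flatMap_cons, ih]

theorem pvA_eq_F (xs : List String) : abstract_constants xs = pvF xs 0 := by
  unfold abstract_constants
  have hb : pvBodyA (pvCs xs) = (fun acc t => acc ++ (if PySem.Str.startswith t "#" then
      pvRep (((PySem.List.index? (pvCs xs) t).getD 0 : Nat) : Int) else [t])) := by
    funext acc t
    unfold pvBodyA
    by_cases hpt : PySem.Str.startswith t "#" = true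
    · rw [if_pos hpt, if_pos hpt]
      exact pvDig _ acc
    · rw [if_neg hpt, if_neg hpt]
  show xs.foldl (pvBodyA (pvCs xs)) [] = pvF xs 0
  rw [hb, PySem.List.foldl_append_eq_flatMap, List.nil_append]
  unfold pvF
  apply pvFlatMap_congr
  intro x hx
  by_cases hpx : PySem.Str.startswith x "#" = true
  · rw [if_pos hpx, if_pos hpx]
    norm_num
  · rw [if_neg hpx, if_neg hpx]

-- ===== VERDICT (by name: the statement is the Claim_ definition above) =====
theorem abstract_constants_spec : Claim_equal_abstract_constants := by
  intro xs _
  show abstract_constants xs = abstract_constants_alt xs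
  rw [pvA_eq_F]
  unfold abstract_constants_alt
  rw [pvGoB_eq (xs.countP (fun x => PySem.Str.startswith x "#")) xs le_rfl [] 0, List.nil_append]
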